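-- pv_equiv track=rewrite | github.com/hieunguy02/Lexical-Analyzer | lexical.py | dfsm_real
-- ===== SOURCE A (Python) =====
-- def char_to_col(char):
--   if (char.isdigit()):
--     return 1
--   elif (char == '.'):
--     return 2
--   elif (char.isalpha()):
--     return 3
--   elif (char == '_'):
--     return 4
--   else:
--     return 5
--
-- def dfsm_real(str):
--   '''
--
--   0  1(d) 2(.)  3(l)  4(_)  5(invalid)
--
--   1   2    0      0     0      0
--
--   2   2    3      0     0      0
--
--   3   4    0      0     0      0
--
--   4   4    0      0     0      0
--   '''
--   state = 1
--   accepting_state = [4]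
--   table = [[0, 1, 2, 3, 4, 5], [1, 2, 0, 0, 0, 0], [2, 2, 3, 0, 0, 0],
--            [3, 4, 0, 0, 0, 0], [4, 4, 0, 0, 0, 0]]
--
--   for i in range(len(str)):
--     col = char_to_col(str[i])
--     state = table[state][col]
--     if state == 0:
--       break
--
--   if state == accepting_state[0]:
--     return 1
--   else:
--     return 0
-- ===== SOURCE B (Python) =====
-- def dfsm_real(str):
--     parts = str.split('.')
--     if len(parts) == 2 and parts[0].isdigit() and parts[1].isdigit():
--         return 1
--     return 0
-- ===== Notes on version B (the rewrite author's own statement) =====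
-- stated objective: simpler
-- what changed: Replaced the hand-written DFA transition table and state-machine forward scan with a split on the dot separator plus two isdigit() checks (exactly two nonempty all-digit parts).
import Mathlib
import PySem

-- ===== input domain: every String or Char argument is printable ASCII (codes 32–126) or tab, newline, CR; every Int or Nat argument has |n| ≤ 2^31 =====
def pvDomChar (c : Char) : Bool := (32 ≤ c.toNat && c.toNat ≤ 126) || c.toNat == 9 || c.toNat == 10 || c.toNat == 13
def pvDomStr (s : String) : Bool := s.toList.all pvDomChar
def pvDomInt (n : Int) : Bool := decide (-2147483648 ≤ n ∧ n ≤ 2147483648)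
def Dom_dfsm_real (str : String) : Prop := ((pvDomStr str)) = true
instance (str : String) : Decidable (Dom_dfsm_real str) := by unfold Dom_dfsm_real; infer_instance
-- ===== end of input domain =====

-- B replaces the DFA transition-table scan with split-on-'.' plus two isdigit checks (objective: simpler).

-- ===== PORT A =====
def char_to_col (c : Char) : Int :=
  if PySem.Chars.isdigit c then 1
  else if c = '.' then 2
  else if PySem.Chars.isalpha c then 3
  else if c = '_' then 4
  else 5

def dfsmTable : List (List Int) :=
  [[0, 1, 2, 3, 4, 5], [1, 2, 0, 0, 0, 0], [2, 2, 3, 0, 0, 0],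
   [3, 4, 0, 0, 0, 0], [4, 4, 0, 0, 0, 0]]

-- the 'for i in range(len(str))' loop with its 'break'; indices into the table are always in range
def dfsmLoop (state : Int) : List Char → Int
  | [] => state
  | c :: rest =>
      let col := char_to_col c
      let state' := PySem.List.pyGetD (PySem.List.pyGetD dfsmTable state []) col 0
      if state' = 0 then 0 else dfsmLoop state' rest

def dfsm_real (str : String) : Int :=
  let accepting_state : List Int := [4]
  let final := dfsmLoop 1 str.toList
  if final = PySem.List.pyGetD accepting_state 0 0 then 1 else 0

-- ===== PORT B =====
def dfsm_real_alt (str : String) : Int :=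
  match PySem.Str.split? str "." with
  | some [l, r] =>
      if PySem.Str.strIsdigit l && PySem.Str.strIsdigit r then 1 else 0
  | _ => 0

-- ===== PRECONDITION & SPEC =====
def Spec_dfsm_real (str : String) (out : Int) : Prop := out = dfsm_real_alt str
instance (str : String) (out : Int) : Decidable (Spec_dfsm_real str out) := by unfold Spec_dfsm_real; infer_instance

-- ===== CLAIM (what is proved, stated in full; the proofs are below) =====
def Claim_equal_dfsm_real : Prop := ∀ (str : String), Dom_dfsm_real str → Spec_dfsm_real str (dfsm_real str)

-- ===== LEMMAS AND PROOFS =====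

-- proof-side reference version of split-on-'.'
def splitDot : List Char → List (List Char)
  | [] => [[]]
  | c :: rest =>
      if c = '.' then [] :: splitDot rest
      else
        match splitDot rest with
        | p :: ps => (c :: p) :: ps
        | [] => [[c]]

theorem splitDot_ne_nil (cs : List Char) : splitDot cs ≠ [] := by
  induction cs with
  | nil => simp [splitDot]
  | cons c rest ih =>
    simp only [splitDot]
    split
    · simp
    · cases h : splitDot rest <;> simp

theorem splitOn_go_eq (l : List Char) : ∀ (fuel : Nat) (cur : List Char) (acc : List (List Char)),
    l.length < fuel →
    PySem.Chars.splitOn.go ['.'] fuel l cur acc =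
      acc.reverse ++ (match splitDot l with
        | p :: ps => (cur.reverse ++ p) :: ps
        | [] => []) := by
  induction l with
  | nil =>
    intro fuel cur acc h
    match fuel with
    | fuel + 1 => simp [PySem.Chars.splitOn.go, splitDot]
  | cons c rest ih =>
    intro fuel cur acc h
    match fuel with
    | fuel + 1 =>
      by_cases hc : c = '.'
      · subst hc
        rw [show PySem.Chars.splitOn.go ['.'] (fuel + 1) ('.' :: rest) cur acc =
              PySem.Chars.splitOn.go ['.'] fuel rest [] (cur.reverse :: acc) from by
            simp [PySem.Chars.splitOn.go, List.isPrefixOf]]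
        rw [ih fuel [] (cur.reverse :: acc) (by simpa using h)]
        have hne := splitDot_ne_nil rest
        cases hsd : splitDot rest with
        | nil => exact absurd hsd hne
        | cons p ps => simp [splitDot, hsd]
      · rw [show PySem.Chars.splitOn.go ['.'] (fuel + 1) (c :: rest) cur acc =
              PySem.Chars.splitOn.go ['.'] fuel rest (c :: cur) acc from by
            simp [PySem.Chars.splitOn.go, List.isPrefixOf, Ne.symm hc]]
        rw [ih fuel (c :: cur) acc (by simpa using h)]
        have hne := splitDot_ne_nil rest
        cases hsd : splitDot rest with
        | nil => exact absurd hsd hne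
        | cons p ps => simp [splitDot, hsd, hc]

theorem splitOn_eq_splitDot (cs : List Char) :
    PySem.Chars.splitOn cs ['.'] = splitDot cs := by
  rw [PySem.Chars.splitOn, splitOn_go_eq cs (cs.length + 1) [] [] (by omega)]
  have hne := splitDot_ne_nil cs
  cases hsd : splitDot cs with
  | nil => exact absurd hsd hne
  | cons p ps => simp

-- DFA step lemmas
theorem loop_nil (s : Int) : dfsmLoop s [] = s := rfl

theorem loop_cons (s : Int) (c : Char) (rest : List Char) :
    dfsmLoop s (c :: rest) =
      if PySem.List.pyGetD (PySem.List.pyGetD dfsmTable s []) (char_to_col c) 0 = 0 then 0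
      else dfsmLoop (PySem.List.pyGetD (PySem.List.pyGetD dfsmTable s []) (char_to_col c) 0) rest := rfl

theorem loop1 (c : Char) (rest : List Char) :
    dfsmLoop 1 (c :: rest) = if PySem.Chars.isdigit c then dfsmLoop 2 rest else 0 := by
  rw [loop_cons]
  unfold char_to_col
  split_ifs <;> simp_all [dfsmTable, PySem.List.pyGetD, PySem.List.pyGet?, PySem.List.pyIdx?]

theorem loop2 (c : Char) (rest : List Char) :
    dfsmLoop 2 (c :: rest) = if PySem.Chars.isdigit c then dfsmLoop 2 rest
      else if c = '.' then dfsmLoop 3 rest else 0 := by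
  rw [loop_cons]
  unfold char_to_col
  split_ifs <;> simp_all [dfsmTable, PySem.List.pyGetD, PySem.List.pyGet?, PySem.List.pyIdx?]

theorem loop3 (c : Char) (rest : List Char) :
    dfsmLoop 3 (c :: rest) = if PySem.Chars.isdigit c then dfsmLoop 4 rest else 0 := by
  rw [loop_cons]
  unfold char_to_col
  split_ifs <;> simp_all [dfsmTable, PySem.List.pyGetD, PySem.List.pyGet?, PySem.List.pyIdx?]

theorem loop4 (c : Char) (rest : List Char) :
    dfsmLoop 4 (c :: rest) = if PySem.Chars.isdigit c then dfsmLoop 4 rest else 0 := by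
  rw [loop_cons]
  unfold char_to_col
  split_ifs <;> simp_all [dfsmTable, PySem.List.pyGetD, PySem.List.pyGet?, PySem.List.pyIdx?]

theorem loop4_eq_four_iff (r : List Char) :
    dfsmLoop 4 r = 4 ↔ r.all PySem.Chars.isdigit = true := by
  induction r with
  | nil => simp [loop_nil]
  | cons c rest ih =>
    rw [loop4]
    by_cases hd : PySem.Chars.isdigit c <;> simp [hd, ih]

theorem loop3_eq_four_iff (r : List Char) :
    dfsmLoop 3 r = 4 ↔ (r ≠ [] ∧ r.all PySem.Chars.isdigit = true) := by
  cases r with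
  | nil => simp [loop_nil]
  | cons c rest =>
    rw [loop3]
    by_cases hd : PySem.Chars.isdigit c <;> simp [hd, loop4_eq_four_iff]

theorem digit_ne_dot {c : Char} (h : PySem.Chars.isdigit c = true) : c ≠ '.' := by
  intro hc; subst hc; simp [PySem.Chars.isdigit] at h

theorem splitDot_of_no_dot {cs : List Char} (h : '.' ∉ cs) : splitDot cs = [cs] := by
  induction cs with
  | nil => rfl
  | cons a as ih =>
    have ha : a ≠ '.' := by intro hc; exact h (hc ▸ List.mem_cons_self)
    have := ih (fun hm => h (List.mem_cons_of_mem a hm))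
    simp [splitDot, ha, this]

theorem splitDot_singleton {cs p : List Char} (h : splitDot cs = [p]) : p = cs ∧ '.' ∉ cs := by
  induction cs generalizing p with
  | nil => simp [splitDot] at h; simp [h]
  | cons a as ih =>
    by_cases ha : a = '.'
    · subst ha; simp [splitDot] at h
      exact absurd h.2 (splitDot_ne_nil as)
    · simp only [splitDot, if_neg ha] at h
      cases has : splitDot as with
      | nil => exact absurd has (splitDot_ne_nil as)
      | cons q qs =>
        rw [has] at h
        cases h
        have := ih has
        simp [this.1, this.2, Ne.symm ha]

def cond2 (r : List Char) : Bool :=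
  match splitDot r with
  | [l, t] => l.all PySem.Chars.isdigit && (t ≠ [] && t.all PySem.Chars.isdigit)
  | _ => false

theorem loop2_eq_four_iff (r : List Char) :
    dfsmLoop 2 r = 4 ↔ cond2 r = true := by
  induction r with
  | nil => simp [loop_nil, cond2, splitDot]
  | cons c rest ih =>
    rw [loop2]
    by_cases hd : PySem.Chars.isdigit c
    · have hdot : c ≠ '.' := by
        intro h; subst h; simp [PySem.Chars.isdigit] at hd
      have hne := splitDot_ne_nil rest
      cases hsd : splitDot rest with
      | nil => exact absurd hsd hne
      | cons p ps =>
        rw [if_pos hd, ih]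
        cases ps with
        | nil => simp [cond2, splitDot, hsd, hdot]
        | cons t ts =>
          cases ts with
          | nil => simp [cond2, splitDot, hsd, hdot, hd]
          | cons u us => simp [cond2, splitDot, hsd, hdot]
    · rw [if_neg hd]
      by_cases hdot : c = '.'
      · subst hdot
        rw [if_pos rfl, loop3_eq_four_iff]
        have hne := splitDot_ne_nil rest
        cases hsd : splitDot rest with
        | nil => exact absurd hsd hne
        | cons p ps =>
          cases ps with
          | nil =>
            have hp : p = rest ∧ ('.' ∉ rest) := splitDot_singleton hsd
            constructor
            · rintro ⟨hr, hall⟩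
              simp [cond2, splitDot, hsd, hp.1, hr, hall]
            · intro h
              simp [cond2, splitDot, hsd] at h
              exact ⟨by simpa [hp.1] using h.1, by simpa [hp.1] using h.2⟩
          | cons t ts =>
            constructor
            · rintro ⟨hr, hall⟩
              -- all-digit rest contains no '.', so splitDot rest = [rest]: contradiction with two parts
              exfalso
              have hnodot : '.' ∉ rest := by
                intro hm
                simp only [List.all_eq_true] at hall
                exact digit_ne_dot (hall _ hm) rfl
              have : splitDot rest = [rest] := splitDot_of_no_dot hnodot
              rw [this] at hsd; cases hsd
            · intro h
              exfalso
              cases ts <;> simp [cond2, splitDot, hsd] at h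
      · rw [if_neg hdot]
        constructor
        · intro h; exact absurd h (by norm_num)
        · intro h
          exfalso
          have hne := splitDot_ne_nil rest
          cases hsd : splitDot rest with
          | nil => exact absurd hsd hne
          | cons p ps =>
            cases ps with
            | nil => simp [cond2, splitDot, hsd, hdot] at h
            | cons t ts =>
              cases ts with
              | nil => simp [cond2, splitDot, hsd, hdot, hd] at h
              | cons u us => simp [cond2, splitDot, hsd, hdot] at h

theorem alt_eq (str : String) :
    dfsm_real_alt str =
      (match splitDot str.toList with
        | [l, r] =>
            if (l ≠ [] && l.all PySem.Chars.isdigit) && (r ≠ [] && r.all PySem.Chars.isdigit)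
            then (1 : Int) else 0
        | _ => 0) := by
  have hsep : (".".toList) = ['.'] := rfl
  rw [dfsm_real_alt, PySem.Str.split?, hsep, PySem.Chars.split?]
  rw [if_neg (by simp)]
  rw [splitOn_eq_splitDot]
  cases hsd : splitDot str.toList with
  | nil => simp
  | cons p ps =>
    cases ps with
    | nil => simp
    | cons t ts =>
      cases ts with
      | nil =>
        simp [PySem.Chars.strIsdigit]
      | cons u us => simp

-- ===== VERDICT (by name: the statement is the Claim_ definition above) =====
theorem dfsm_real_spec : Claim_equal_dfsm_real := by
  intro str _
  unfold Spec_dfsm_real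
  rw [alt_eq, dfsm_real]
  simp only [PySem.List.pyGetD]
  cases hcs : str.toList with
  | nil => simp [dfsmLoop, splitDot]
  | cons c rest =>
    rw [loop1]
    by_cases hd : PySem.Chars.isdigit c
    · have hdot : c ≠ '.' := by
        intro h; subst h; simp [PySem.Chars.isdigit] at hd
      rw [if_pos hd]
      have hne := splitDot_ne_nil rest
      cases hsd : splitDot rest with
      | nil => exact absurd hsd hne
      | cons p ps =>
        have key := loop2_eq_four_iff rest
        rw [cond2, hsd] at key
        cases ps with
        | nil =>
          simp only [splitDot, if_neg hdot, hsd]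
          have : dfsmLoop 2 rest ≠ 4 := fun h4 => by simpa using key.mp h4
          simp [this]
        | cons t ts =>
          cases ts with
          | nil =>
            simp only [List.all_eq_true, Bool.and_eq_true, decide_eq_true_eq] at key
            simp only [splitDot, if_neg hdot, hsd]
            simp [key, hd]
          | cons u us =>
            simp only [splitDot, if_neg hdot, hsd]
            have : dfsmLoop 2 rest ≠ 4 := fun h4 => by simpa using key.mp h4
            simp [this]
    · rw [if_neg hd]
      by_cases hdot : c = '.'
      · subst hdot
        simp only [splitDot, reduceIte]
        have hne := splitDot_ne_nil rest
        cases hsd : splitDot rest with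
        | nil => exact absurd hsd hne
        | cons p ps => cases ps <;> simp
      · simp only [splitDot, if_neg hdot]
        have hne := splitDot_ne_nil rest
        cases hsd : splitDot rest with
        | nil => exact absurd hsd hne
        | cons p ps =>
          cases ps with
          | nil => simp
          | cons t ts => cases ts <;> simp [hd]
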